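-- pv_equiv track=rewrite | github.com/zhuifeng001/chatdoc_stack | code/chatdoc/pkg/personal_doc/preprocess_doctree.py | merge_table
-- ===== SOURCE A (Python) =====
-- def merge_table(infos):
--     """
--     合并表格，合并逻辑为连续的表格进行合并
--     :param lst:
--     :return:
--     """
--
--     def end_id(i, infos):
--         while i < len(infos) - 1:
--             if """<table border="1">""" in infos[i] and """<table border="1">""" in infos[i + 1]:
--                 i += 1
--             else:
--                 break
--         return i
--
--     result = []
--     i = 0
--     while i < len(infos):
--         if """<table border="1">""" in infos[i]:
--             j = end_id(i, infos)
--             result.append("""<table border="1">"""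
--                           + "".join([r.replace("""<table border="1">""", "").replace("""</table>""", "") for r in infos[i:j + 1]])
--                           + """</table>""")
--             i = j + 1
--         else:
--             result.append(infos[i])
--             i += 1
--     return result
-- ===== SOURCE B (Python) =====
-- def merge_table(infos):
--     """
--     合并表格，合并逻辑为连续的表格进行合并 — single linear pass with a run buffer.
--     """
--     TBL = """<table border="1">"""
--     result = []
--     group = []
--
--     def flush():
--         if group:
--             result.append(TBL
--                           + "".join(r.replace(TBL, "").replace("""</table>""", "") for r in group)
--                           + """</table>""")
--             group.clear()
--
--     for info in infos:
--         if TBL in info: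
--             group.append(info)
--         else:
--             flush()
--             result.append(info)
--     flush()
--     return result
-- ===== Notes on version B (the rewrite author's own statement) =====
-- stated objective: simpler
-- what changed: Replaced the index-jumping while loop with its end_id lookahead helper and slicing by a single linear for-loop that buffers the current run of table blocks and flushes it at each run boundary.
import Mathlib
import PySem

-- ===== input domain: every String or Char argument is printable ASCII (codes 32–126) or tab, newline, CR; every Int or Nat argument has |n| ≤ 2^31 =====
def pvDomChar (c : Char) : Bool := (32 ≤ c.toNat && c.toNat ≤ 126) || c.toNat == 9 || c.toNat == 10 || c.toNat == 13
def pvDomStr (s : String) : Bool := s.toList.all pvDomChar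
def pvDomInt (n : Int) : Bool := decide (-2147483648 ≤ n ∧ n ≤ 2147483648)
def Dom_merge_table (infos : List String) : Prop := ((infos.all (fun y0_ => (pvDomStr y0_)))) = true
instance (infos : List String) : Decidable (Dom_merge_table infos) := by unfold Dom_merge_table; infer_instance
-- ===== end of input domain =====

-- B replaces A's index-jumping loop + end_id lookahead by one linear pass with a run buffer (objective: simpler).

-- shared literal pieces of both Python sources (the same expressions appear verbatim in A and B)
def pvHasTbl (s : String) : Bool := PySem.Str.isIn "<table border=\"1\">" s

def pvWrap (group : List String) : String :=
  "<table border=\"1\">"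
    ++ PySem.Str.join "" (group.map (fun r =>
         PySem.Str.replace (PySem.Str.replace r "<table border=\"1\">" "") "</table>" ""))
    ++ "</table>"

-- ===== PORT A =====
-- helper end_id: advance while infos[i] and infos[i+1] both contain the table marker
def mtEndId (infos : List String) (i : Nat) : Nat :=
  if _h : i < infos.length - 1 then
    if pvHasTbl (infos.getD i "") && pvHasTbl (infos.getD (i + 1) "") then
      mtEndId infos (i + 1)
    else i
  else i
termination_by infos.length - i
decreasing_by omega

-- needed by mtLoop's termination: end_id never moves backwards
theorem mtEndId_ge (infos : List String) : ∀ n i, infos.length - i ≤ n → i ≤ mtEndId infos i := by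
  intro n
  induction n with
  | zero =>
      intro i h
      rw [mtEndId]
      split
      · omega
      · omega
  | succ n ih =>
      intro i h
      rw [mtEndId]
      split
      · split
        · exact Nat.le_trans (by omega) (ih (i + 1) (by omega))
        · omega
      · omega

theorem mtEndId_ge' (infos : List String) (i : Nat) : i ≤ mtEndId infos i :=
  mtEndId_ge infos infos.length i (by omega)

def mtLoop (infos : List String) (i : Nat) (result : List String) : List String :=
  if _h : i < infos.length then
    if pvHasTbl (infos.getD i "") then
      mtLoop infos (mtEndId infos i + 1)
        (result ++ [pvWrap (PySem.List.slice infos (some (i : Int)) (some ((mtEndId infos i : Int) + 1)))])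
    else
      mtLoop infos (i + 1) (result ++ [infos.getD i ""])
  else result
termination_by infos.length - i
decreasing_by
  · have := mtEndId_ge' infos i; omega
  · omega

def merge_table (infos : List String) : List String :=
  mtLoop infos 0 []

-- ===== PORT B =====
def mtFlush (result group : List String) : List String :=
  if group.isEmpty then result else result ++ [pvWrap group]

def mtStep (st : List String × List String) (info : String) : List String × List String :=
  if pvHasTbl info then (st.1, st.2 ++ [info])
  else (mtFlush st.1 st.2 ++ [info], [])

def merge_table_alt (infos : List String) : List String :=
  let st := infos.foldl mtStep ([], [])
  mtFlush st.1 st.2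

-- ===== PRECONDITION & SPEC =====
def Spec_merge_table (infos : List String) (out : List String) : Prop := out = merge_table_alt infos
instance (infos : List String) (out : List String) : Decidable (Spec_merge_table infos out) := by unfold Spec_merge_table; infer_instance

-- ===== CLAIM (what is proved, stated in full; the proofs are below) =====
def Claim_equal_merge_table : Prop := ∀ (infos : List String), Dom_merge_table infos → Spec_merge_table infos (merge_table infos)

-- ===== LEMMAS AND PROOFS =====

theorem mtEndId_lt (infos : List String) : ∀ n i, infos.length - i ≤ n → i < infos.length →
    mtEndId infos i < infos.length := by
  intro n
  induction n with
  | zero => intro i h hi; omega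
  | succ n ih =>
      intro i h hi
      rw [mtEndId]
      split
      · split
        · exact ih (i + 1) (by omega) (by omega)
        · omega
      · omega

theorem mtEndId_all (infos : List String) : ∀ n i, infos.length - i ≤ n →
    pvHasTbl (infos.getD i "") = true →
    ∀ k, i ≤ k → k ≤ mtEndId infos i → pvHasTbl (infos.getD k "") = true := by
  intro n
  induction n with
  | zero =>
      intro i h hi k hk1 hk2
      rw [mtEndId] at hk2
      split at hk2
      · omega
      · have : k = i := by omega
        simpa [this] using hi
  | succ n ih =>
      intro i h hi k hk1 hk2
      rw [mtEndId] at hk2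
      split at hk2
      · split at hk2
        · rename_i hcond
          rcases Nat.eq_or_lt_of_le hk1 with rfl | hlt
          · exact hi
          · exact ih (i + 1) (by omega) (by simpa using (Bool.and_elim_right hcond)) k (by omega) hk2
        · have : k = i := by omega
          simpa [this] using hi
      · have : k = i := by omega
        simpa [this] using hi

theorem mtEndId_stop (infos : List String) : ∀ n i, infos.length - i ≤ n →
    mtEndId infos i < infos.length - 1 →
    (pvHasTbl (infos.getD (mtEndId infos i) "") && pvHasTbl (infos.getD (mtEndId infos i + 1) "")) = false := by
  intro n
  induction n with
  | zero =>
      intro i h hlt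
      rw [mtEndId] at hlt ⊢
      split at hlt <;> [skip; omega]
      omega
  | succ n ih =>
      intro i h hlt
      rw [mtEndId] at hlt ⊢
      split at hlt
      · rename_i hcase
        split at hlt
        · rename_i hcond
          rw [dif_pos hcase, if_pos hcond]
          exact ih (i + 1) (by omega) hlt
        · rename_i hcond
          rw [dif_pos hcase, if_neg hcond]
          simpa using hcond
      · rename_i hcase
        omega

-- folding a run of table blocks just extends the buffer
theorem foldl_run (run : List String) : ∀ (rest result group : List String),
    (∀ x ∈ run, pvHasTbl x = true) →
    (run ++ rest).foldl mtStep (result, group) = rest.foldl mtStep (result, group ++ run) := by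
  induction run with
  | nil => intro rest result group _; simp
  | cons x run ih =>
      intro rest result group hall
      have hx : pvHasTbl x = true := hall x (by simp)
      simp only [List.cons_append, List.foldl_cons, mtStep, hx, if_pos]
      rw [ih rest result (group ++ [x]) (fun y hy => hall y (by simp [hy]))]
      simp

theorem mtRun_ne_nil (infos : List String) (i j : Nat) (hi : i < infos.length) (hij : i ≤ j) :
    ((infos.drop i).take (j + 1 - i)).isEmpty = false := by
  rw [List.isEmpty_eq_false_iff, ← List.length_pos_iff]
  simp only [List.length_take, List.length_drop]
  omega

-- the run [i, mtEndId i] consists of table blocks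
theorem mtRun_all (infos : List String) (i : Nat) (hi : i < infos.length)
    (ht : pvHasTbl (infos.getD i "") = true) :
    ∀ x ∈ (infos.drop i).take (mtEndId infos i + 1 - i), pvHasTbl x = true := by
  intro x hx
  rw [List.mem_iff_getElem] at hx
  obtain ⟨k, hk, hget⟩ := hx
  simp only [List.length_take, List.length_drop] at hk
  have hkl : i + k < infos.length := by omega
  have : x = infos.getD (i + k) "" := by
    rw [List.getD_eq_getElem infos "" hkl, ← hget, List.getElem_take, List.getElem_drop]
  rw [this]
  exact mtEndId_all infos infos.length i (by omega) ht (i + k) (by omega) (by omega)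

-- main invariant: A's loop from index i equals B's fold over the remaining suffix with empty buffer
theorem mtLoop_eq (infos : List String) : ∀ n i result, infos.length - i ≤ n →
    mtLoop infos i result =
      (let st := (infos.drop i).foldl mtStep (result, []); mtFlush st.1 st.2) := by
  intro n
  induction n with
  | zero =>
      intro i result h
      rw [mtLoop, dif_neg (by omega)]
      simp [List.drop_eq_nil_of_le (show infos.length ≤ i by omega), mtFlush]
  | succ n ih =>
      intro i result h
      by_cases hi : i < infos.length
      case neg =>
        rw [mtLoop, dif_neg hi]
        simp [List.drop_eq_nil_of_le (show infos.length ≤ i by omega), mtFlush]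
      case pos =>
      by_cases ht : pvHasTbl (infos.getD i "") = true
      case neg =>
        -- ordinary element: emit it and continue
        have ht' : pvHasTbl (infos[i]?.getD "") = false := by
          rw [← List.getD_eq_getElem?_getD]; simpa using ht
        have hdrop : infos.drop i = infos.getD i "" :: infos.drop (i + 1) := by
          rw [List.getD_eq_getElem infos "" hi]
          exact List.drop_eq_getElem_cons hi
        rw [mtLoop, dif_pos hi, if_neg ht, ih (i + 1) (result ++ [infos.getD i ""]) (by omega)]
        simp only [hdrop, List.foldl_cons]
        have hstep : mtStep (result, []) (infos.getD i "") = (result ++ [infos.getD i ""], []) := by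
          simp [mtStep, ht', mtFlush]
        rw [hstep]
      case pos =>
      -- table run starting at i
      set j := mtEndId infos i with hj
      have hij : i ≤ j := mtEndId_ge' infos i
      have hjl : j < infos.length := mtEndId_lt infos infos.length i (by omega) hi
      have hsum : i + (j + 1 - i) = j + 1 := by omega
      have hdecomp : infos.drop i = (infos.drop i).take (j + 1 - i) ++ infos.drop (j + 1) := by
        conv_lhs => rw [← List.take_append_drop (j + 1 - i) (infos.drop i)]
        rw [List.drop_drop, hsum]
      have hfold : (infos.drop i).foldl mtStep (result, []) =
          (infos.drop (j + 1)).foldl mtStep (result, (infos.drop i).take (j + 1 - i)) := by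
        conv_lhs => rw [hdecomp]
        rw [foldl_run _ _ _ _ (by rw [hj]; exact mtRun_all infos i hi ht)]
        rw [List.nil_append]
      have hne := mtRun_ne_nil infos i j hi hij
      have hslice : PySem.List.slice infos (some (i : Int)) (some ((j : Int) + 1)) =
          (infos.drop i).take (j + 1 - i) := by
        have hc : ((j : Int) + 1) = ((j + 1 : Nat) : Int) := by push_cast; ring
        rw [hc, PySem.List.slice_natCast]
      rw [mtLoop, dif_pos hi, if_pos ht, ← hj, hslice]
      by_cases hend : j + 1 < infos.length
      · -- boundary: infos[j+1] is not a table block, so B flushes the buffer there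
        have hstop := mtEndId_stop infos infos.length i (by omega) (by omega)
        rw [← hj] at hstop
        have htj : pvHasTbl (infos.getD j "") = true :=
          mtEndId_all infos infos.length i (by omega) ht j hij (by omega)
        have hnt : pvHasTbl (infos.getD (j + 1) "") = false := by
          cases hx : pvHasTbl (infos.getD (j + 1) "")
          · rfl
          · rw [htj, hx] at hstop; simp at hstop
        have hnt' : pvHasTbl (infos[j + 1]?.getD "") = false := by
          rwa [List.getD_eq_getElem?_getD] at hnt
        have hdrop : infos.drop (j + 1) = infos.getD (j + 1) "" :: infos.drop (j + 1 + 1) := by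
          rw [List.getD_eq_getElem infos "" hend]
          exact List.drop_eq_getElem_cons hend
        rw [mtLoop, dif_pos hend, if_neg (by simp [hnt']),
          ih (j + 1 + 1) (result ++ [pvWrap ((infos.drop i).take (j + 1 - i))] ++ [infos.getD (j + 1) ""]) (by omega)]
        simp only [hfold, hdrop, List.foldl_cons]
        have hstep : mtStep (result, (infos.drop i).take (j + 1 - i)) (infos.getD (j + 1) "") =
            (result ++ [pvWrap ((infos.drop i).take (j + 1 - i))] ++ [infos.getD (j + 1) ""], []) := by
          simp [mtStep, hnt', mtFlush, hne]
        rw [hstep]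
      · -- the run reaches the end of the list
        have hdropnil : infos.drop (j + 1) = [] := List.drop_eq_nil_of_le (by omega)
        rw [mtLoop, dif_neg (by omega)]
        simp [hfold, hdropnil, mtFlush, hne]

-- ===== VERDICT (by name: the statement is the Claim_ definition above) =====
theorem merge_table_spec : Claim_equal_merge_table := by
  intro infos _
  unfold Spec_merge_table merge_table merge_table_alt
  rw [mtLoop_eq infos infos.length 0 [] (by omega)]
  simp
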